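-- pv_equiv track=rewrite | github.com/ACEnglish/truvari | truvari/phab.py | deduplicate_haps
-- ===== SOURCE A (Python) =====
-- def deduplicate_haps(d):
--     """
--     Deduplicates a dictionary by replacing duplicate values with a single key.
--     """
--     value_to_key = {}
--     dedup_dict = {}
--     key_mapping = {}
--
--     for key, value in d.items():
--         if value in value_to_key:
--             current_key = value_to_key[value]
--
--             # If the new key is a 'ref_' key and the current key isn't, update preference
--             if key.startswith("ref_") and not current_key.startswith("ref_"):
--                 dedup_dict[key] = value
--                 del dedup_dict[current_key]
--                 value_to_key[value] = key
--
--                 for k, v in key_mapping.items():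
--                     if v == current_key:
--                         key_mapping[k] = key
--
--                 key_mapping[key] = key
--             else:
--                 key_mapping[key] = current_key
--
--         else:
--             dedup_key = key
--             value_to_key[value] = dedup_key
--             dedup_dict[dedup_key] = value
--             key_mapping[key] = dedup_key
--
--     return dedup_dict, key_mapping
-- ===== SOURCE B (Python) =====
-- def deduplicate_haps(d):
--     """
--     Deduplicates a dictionary by replacing duplicate values with a single key.
--     """
--     group_of = {}   # value -> index into groups
--     groups = []     # per distinct value: [representative key, value, event time]
--     t = 0
--     for key, value in d.items():
--         g = group_of.get(value)
--         if g is None: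
--             group_of[value] = len(groups)
--             groups.append([key, value, t])
--         elif key.startswith("ref_") and not groups[g][0].startswith("ref_"):
--             groups[g][0] = key
--             groups[g][2] = t
--         t += 1
--     dedup_dict = {rep: value for rep, value, _ in sorted(groups, key=lambda e: e[2])}
--     key_mapping = {key: groups[group_of[value]][0] for key, value in d.items()}
--     return dedup_dict, key_mapping
-- ===== Notes on version B (the rewrite author's own statement) =====
-- stated objective: alternative
-- what changed: One pass keeps a reverse index value -> group [representative, value, event]; a ref_ swap touches only that group, and both result dicts are emitted afterwards (dedup_dict by sorting groups by event time, key_mapping by one map over d), removing A's full rescan of key_mapping and dict re-insertion on every swap.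
import Mathlib
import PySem

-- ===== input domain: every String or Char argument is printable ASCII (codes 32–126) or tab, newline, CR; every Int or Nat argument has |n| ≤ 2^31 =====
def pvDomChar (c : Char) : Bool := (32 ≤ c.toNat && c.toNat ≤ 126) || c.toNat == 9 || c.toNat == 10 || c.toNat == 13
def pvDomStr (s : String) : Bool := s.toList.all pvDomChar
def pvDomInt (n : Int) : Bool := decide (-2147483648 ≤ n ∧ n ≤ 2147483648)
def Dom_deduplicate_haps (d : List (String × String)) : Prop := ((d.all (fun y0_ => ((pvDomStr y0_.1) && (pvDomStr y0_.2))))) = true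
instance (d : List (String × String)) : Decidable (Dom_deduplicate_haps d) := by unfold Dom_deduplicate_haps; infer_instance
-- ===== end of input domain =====

-- B replaces A's per-swap rescans of dedup_dict and key_mapping by one pass that keeps a
-- reverse index value -> group (representative, value, event time), then emits both dicts at the
-- end (dedup_dict ordered by event time, key_mapping by one map over d); objective: alternative.

-- ===== PORT A =====
-- one iteration of A's `for key, value in d.items()` loop over the state
-- (value_to_key, dedup_dict, key_mapping)
def dedupStepA
    (st : PySem.Dict String String × PySem.Dict String String × PySem.Dict String String)
    (kv : String × String) :
    PySem.Dict String String × PySem.Dict String String × PySem.Dict String String :=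
  match st, kv with
  | (value_to_key, dedup_dict, key_mapping), (key, value) =>
    match value_to_key.get? value with
    | some current_key =>
      if PySem.Str.startswith key "ref_" && !(PySem.Str.startswith current_key "ref_") then
        let dedup_dict := dedup_dict.insert key value
        let dedup_dict := dedup_dict.erase current_key
        let value_to_key := value_to_key.insert value key
        -- `for k, v in key_mapping.items(): if v == current_key: key_mapping[k] = key`
        let key_mapping := key_mapping.items.foldl
          (fun (a : PySem.Dict String String) p =>
            if p.2 == current_key then a.insert p.1 key else a) key_mapping
        let key_mapping := key_mapping.insert key key
        (value_to_key, dedup_dict, key_mapping)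
      else
        (value_to_key, dedup_dict, key_mapping.insert key current_key)
    | none =>
      (value_to_key.insert value key, dedup_dict.insert key value, key_mapping.insert key key)

def deduplicate_haps (d : List (String × String)) :
    (List (String × String)) × (List (String × String)) :=
  let st := d.foldl dedupStepA (PySem.Dict.empty, PySem.Dict.empty, PySem.Dict.empty)
  (st.2.1.items, st.2.2.items)

-- ===== PORT B =====
-- one iteration of B's loop over the state (group_of, groups, t)
def dedupStepB
    (st : PySem.Dict String Nat × List (String × String × Nat) × Nat)
    (kv : String × String) :
    PySem.Dict String Nat × List (String × String × Nat) × Nat :=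
  match st, kv with
  | (group_of, groups, t), (key, value) =>
    match group_of.get? value with
    | none => (group_of.insert value groups.length, groups ++ [(key, value, t)], t + 1)
    | some g =>
      -- Source B reads groups[g]; g is always a valid index, so getD is exact here
      let e := groups.getD g ("", "", 0)
      if PySem.Str.startswith key "ref_" && !(PySem.Str.startswith e.1 "ref_") then
        (group_of, groups.set g (key, e.2.1, t), t + 1)
      else
        (group_of, groups, t + 1)

-- Source B's `groups[group_of[value]][0]`
def dedupRepOf (group_of : PySem.Dict String Nat) (groups : List (String × String × Nat))
    (v : String) : String :=
  (groups.getD (group_of.getD v 0) ("", "", 0)).1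

def deduplicate_haps_alt (d : List (String × String)) :
    (List (String × String)) × (List (String × String)) :=
  let st := d.foldl dedupStepB (PySem.Dict.empty, [], 0)
  let group_of := st.1
  let groups := st.2.1
  let dedup_dict := (PySem.List.sorted groups (fun e => e.2.2)).foldl
    (fun (a : PySem.Dict String String) e => a.insert e.1 e.2.1) PySem.Dict.empty
  let key_mapping := d.foldl
    (fun (a : PySem.Dict String String) kv => a.insert kv.1 (dedupRepOf group_of groups kv.2))
    PySem.Dict.empty
  (dedup_dict.items, key_mapping.items)

-- ===== PRECONDITION & SPEC =====
-- Pre_ excludes association lists with duplicate keys: they do not represent a Python dict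
-- (A's parameter is a dict, so such a list never reaches A's loop as given).
def Pre_deduplicate_haps (d : List (String × String)) : Prop :=
  (d.map Prod.fst).Nodup

instance (d : List (String × String)) : Decidable (Pre_deduplicate_haps d) := by
  unfold Pre_deduplicate_haps; infer_instance

def pvWitness_deduplicate_haps : (List (String × String)) :=
  [("h1", "AAG"), ("h2", "AAG"), ("ref_h3", "AAG"), ("h4", "CT")]

def Spec_deduplicate_haps (d : List (String × String))
    (out : (List (String × String)) × (List (String × String))) : Prop :=
  out = deduplicate_haps_alt d

instance (d : List (String × String)) (out : (List (String × String)) × (List (String × String))) :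
    Decidable (Spec_deduplicate_haps d out) := by unfold Spec_deduplicate_haps; infer_instance

-- ===== CLAIM (what is proved, stated in full; the proofs are below) =====
def Claim_equal_deduplicate_haps : Prop := ∀ (d : List (String × String)), Dom_deduplicate_haps d → Pre_deduplicate_haps d → Spec_deduplicate_haps d (deduplicate_haps d)

-- ===== LEMMAS AND PROOFS =====
lemma get?_mk_of_nodup {ν : Type} (l : List (String × ν)) (hnd : (l.map Prod.fst).Nodup)
    {i : Nat} (h : i < l.length) :
    (PySem.Dict.mk l).get? l[i].1 = some l[i].2 := by
  induction l generalizing i with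
  | nil => simp at h
  | cons p rest ih =>
    rw [List.map_cons, List.nodup_cons] at hnd
    cases i with
    | zero => rw [List.getElem_cons_zero, PySem.Dict.get?_mk_cons]; simp
    | succ i =>
      have hi : i < rest.length := by simpa using h
      simp only [List.getElem_cons_succ]
      rw [PySem.Dict.get?_mk_cons]
      have hne : (p.1 == rest[i].1) = false := by
        simp only [beq_eq_false_iff_ne]
        intro he
        exact hnd.1 (he ▸ List.mem_map_of_mem (l := rest) (f := Prod.fst) (List.getElem_mem _))
      rw [hne]
      simp only [Bool.false_eq_true, if_false]
      exact ih hnd.2 hi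

lemma get?_mk_of_not_mem {ν : Type} (l : List (String × ν)) {v : String}
    (h : v ∉ l.map Prod.fst) :
    (PySem.Dict.mk l).get? v = none := by
  induction l with
  | nil => rfl
  | cons p rest ih =>
    simp only [List.map_cons, List.mem_cons, not_or] at h
    rw [PySem.Dict.get?_mk_cons]
    have : (p.1 == v) = false := by simpa [beq_eq_false_iff_ne] using fun he => h.1 he.symm
    rw [this]
    simpa using ih h.2

lemma sorted_append_max {α : Type} (xs : List α) (key : α → Nat) (e : α)
    (h : ∀ y ∈ xs, key y < key e) :
    PySem.List.sorted (xs ++ [e]) key = PySem.List.sorted xs key ++ [e] := by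
  rw [PySem.List.sorted_eq_foldl_insertBy, List.foldl_append, List.foldl_cons, List.foldl_nil,
    ← PySem.List.sorted_eq_foldl_insertBy]
  apply PySem.List.insertBy_of_forall_not_before
  intro y hy
  have : y ∈ xs := (PySem.List.mem_sorted xs key false y).1 hy
  simpa using Nat.not_lt.mpr (Nat.le_of_lt (h y this))
lemma snd_eq_of_mem_items {ν : Type} (d : PySem.Dict String ν) {q p : String × ν}
    (hq : q ∈ d.items) (hp : p ∈ d.items) (hnd : d.keys.Nodup) (h : q.1 = p.1) : q.2 = p.2 := by
  have h1 : d.get? q.1 = some q.2 := PySem.Dict.get?_of_mem_items d (by simpa using hq) hnd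
  have h2 : d.get? p.1 = some p.2 := PySem.Dict.get?_of_mem_items d (by simpa using hp) hnd
  rw [h] at h1
  rw [h1] at h2
  exact Option.some.inj h2

lemma patch_fold_items (c k : String) :
    ∀ (l : List (String × String)) (acc : PySem.Dict String String),
      acc.keys.Nodup → (l.map Prod.fst).Nodup → (∀ p ∈ l, p ∈ acc.items) →
      (l.foldl (fun (a : PySem.Dict String String) p =>
          if p.2 == c then a.insert p.1 k else a) acc).items
        = acc.items.map (fun q => if decide (q.1 ∈ l.map Prod.fst) && (q.2 == c) then (q.1, k) else q) := by
  intro l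
  induction l with
  | nil => intro acc _ _ _; simp
  | cons p rest ih =>
    intro acc hkeys hlnd hmem
    rw [List.map_cons, List.nodup_cons] at hlnd
    rw [List.foldl_cons]
    by_cases hc : p.2 = c
    · have hcb : (p.2 == c) = true := beq_iff_eq.mpr hc
      rw [hcb, if_pos rfl]
      have hpm : p ∈ acc.items := hmem p (List.mem_cons_self)
      have hcont : acc.contains p.1 = true := by
        rw [PySem.Dict.contains_eq_decide_mem_keys]
        simp only [PySem.Dict.keys, decide_eq_true_eq]
        exact List.mem_map_of_mem hpm
      have hins := PySem.Dict.items_insert_of_contains acc (k := p.1) k hcont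
      have hkeys' : (acc.insert p.1 k).keys.Nodup := by
        simp only [PySem.Dict.keys, hins, List.map_map]
        have : (Prod.fst ∘ fun q : String × String => if (q.1 == p.1) = true then (p.1, k) else q)
            = Prod.fst := by
          funext q; by_cases h : q.1 = p.1 <;> simp [h]
        rw [this]; exact hkeys
      have hmem' : ∀ p' ∈ rest, p' ∈ (acc.insert p.1 k).items := by
        intro p' hp'
        have hne : p'.1 ≠ p.1 := fun he => hlnd.1 (he ▸ List.mem_map_of_mem hp')
        rw [hins]
        have : p' = (fun q : String × String => if (q.1 == p.1) = true then (p.1, k) else q) p' := by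
          simp [hne]
        rw [this]
        exact List.mem_map_of_mem (hmem p' (List.mem_cons_of_mem _ hp'))
      rw [ih (acc.insert p.1 k) hkeys' hlnd.2 hmem', hins, List.map_map]
      apply List.map_congr_left
      intro q hq
      by_cases hqp : q.1 = p.1
      · have hq2 : q.2 = p.2 := snd_eq_of_mem_items acc hq hpm hkeys hqp
        simp only [Function.comp_apply, hqp, beq_self_eq_true, if_true]
        have hnp : p.1 ∉ List.map Prod.fst rest := hlnd.1
        simp [hnp, hq2, hc]
      · have : (q.1 == p.1) = false := beq_eq_false_iff_ne.mpr hqp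
        simp only [Function.comp_apply, this, Bool.false_eq_true, if_false]
        have h3 : decide (q.1 ∈ List.map Prod.fst (p :: rest)) = decide (q.1 ∈ List.map Prod.fst rest) := by
          simp [List.mem_cons, hqp]
        rw [h3]
    · have hcb : (p.2 == c) = false := beq_eq_false_iff_ne.mpr hc
      rw [hcb]
      simp only [Bool.false_eq_true, if_false]
      rw [ih acc hkeys hlnd.2 (fun p' hp' => hmem p' (List.mem_cons_of_mem _ hp'))]
      apply List.map_congr_left
      intro q hq
      by_cases hqp : q.1 = p.1
      · have hq2 : q.2 = p.2 := snd_eq_of_mem_items acc hq (hmem p List.mem_cons_self) hkeys hqp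
        have : (q.2 == c) = false := by rw [hq2]; exact hcb
        simp [this]
      · have h3 : decide (q.1 ∈ List.map Prod.fst (p :: rest)) = decide (q.1 ∈ List.map Prod.fst rest) := by
          simp [List.mem_cons, hqp]
        rw [h3]

lemma nodup_set_of_not_mem {α : Type} (l : List α) (i : Nat) (x : α)
    (hnd : l.Nodup) (hx : x ∉ l) : (l.set i x).Nodup := by
  induction l generalizing i with
  | nil => simp
  | cons a l ih =>
    rw [List.nodup_cons] at hnd
    cases i with
    | zero =>
      rw [List.set_cons_zero, List.nodup_cons]
      exact ⟨fun h => hx (List.mem_cons_of_mem _ h), hnd.2⟩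
    | succ i =>
      rw [List.set_cons_succ, List.nodup_cons]
      refine ⟨fun h => ?_, ih i hnd.2 (fun h => hx (List.mem_cons_of_mem _ h))⟩
      rcases List.mem_or_eq_of_mem_set h with h | h
      · exact hnd.1 h
      · exact hx (h ▸ List.mem_cons_self)

lemma contains_false_of_not_mem_fst {ν : Type} (d : PySem.Dict String ν) {k : String}
    (h : k ∉ d.items.map Prod.fst) : d.contains k = false := by
  rw [PySem.Dict.contains_eq_decide_mem_keys]
  simp only [PySem.Dict.keys, decide_eq_false_iff_not]
  exact h

lemma zip_get?_idx (vals : List String) (hnd : vals.Nodup) {j : Nat} (h : j < vals.length) :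
    (PySem.Dict.mk vals.zipIdx).get? vals[j] = some j := by
  have h2 : (vals.zipIdx).map Prod.fst = vals := List.zipIdx_map_fst 0 vals
  have h3 : j < vals.zipIdx.length := by simpa using h
  have := get?_mk_of_nodup (vals.zipIdx) (by rw [h2]; exact hnd) h3
  simpa [List.getElem_zipIdx] using this

lemma zip_get?_none (vals : List String) {v : String} (h : v ∉ vals) :
    (PySem.Dict.mk vals.zipIdx).get? v = none :=
  get?_mk_of_not_mem _ (by rw [List.zipIdx_map_fst]; exact h)
structure DedupInv (processed : List (String × String))
    (v2k dd km : PySem.Dict String String)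
    (go : PySem.Dict String Nat) (groups : List (String × String × Nat)) (t : Nat) : Prop where
  hv2k : v2k.items = groups.map (fun e => (e.2.1, e.1))
  hdd : dd.items = (PySem.List.sorted groups (fun e => e.2.2)).map (fun e => (e.1, e.2.1))
  hkm : km.items = processed.map (fun kv => (kv.1, dedupRepOf go groups kv.2))
  hgo : go.items = (groups.map (fun e => e.2.1)).zipIdx
  ht : t = processed.length
  hev_lt : ∀ e ∈ groups, e.2.2 < t
  hev_nd : (groups.map (fun e => e.2.2)).Nodup
  hrep_mem : ∀ e ∈ groups, e.1 ∈ processed.map Prod.fst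
  hrep_nd : (groups.map (fun e => e.1)).Nodup
  hval_nd : (groups.map (fun e => e.2.1)).Nodup
  hseen : ∀ kv ∈ processed, kv.2 ∈ groups.map (fun e => e.2.1)

lemma filter_ne_rep (groups : List (String × String × Nat)) (g : Nat) (hglen : g < groups.length)
    (hrep_nd : (groups.map (fun e => e.1)).Nodup) (ck : String) (hck : groups[g].1 = ck) :
    groups.filter (fun e => !(e.1 == ck)) = groups.take g ++ groups.drop (g + 1) := by
  have hsplit : groups = groups.take g ++ groups[g] :: groups.drop (g + 1) := by
    rw [List.getElem_cons_drop, List.take_append_drop]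
  have hndsplit : ((groups.take g ++ groups[g] :: groups.drop (g + 1)).map
      (fun e => e.1)).Nodup := by rw [← hsplit]; exact hrep_nd
  rw [List.map_append, List.nodup_append, List.map_cons, List.nodup_cons] at hndsplit
  conv_lhs => rw [hsplit]
  rw [List.filter_append, List.filter_cons]
  have hpg : (!(groups[g].1 == ck)) = false := by simp [hck]
  rw [hpg]
  simp only [Bool.false_eq_true, if_false]
  congr 1
  · rw [List.filter_eq_self]
    intro e he
    have h1 : e.1 ≠ ck := by
      intro h1
      exact (hndsplit.2.2 _ (List.mem_map_of_mem he) _ List.mem_cons_self) (h1.trans hck.symm)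
    simpa using h1
  · rw [List.filter_eq_self]
    intro e he
    have h1 : e.1 ≠ ck := by
      intro h1
      exact hndsplit.2.1.1 ((h1.trans hck.symm) ▸ List.mem_map_of_mem he)
    simpa using h1

lemma dedup_inv_step (processed : List (String × String))
    (v2k dd km : PySem.Dict String String)
    (go : PySem.Dict String Nat) (groups : List (String × String × Nat)) (t : Nat)
    (inv : DedupInv processed v2k dd km go groups t)
    (key value : String) (hfresh : key ∉ processed.map Prod.fst)
    (hknd : (processed.map Prod.fst).Nodup) :
    DedupInv (processed ++ [(key, value)])
      (dedupStepA (v2k, dd, km) (key, value)).1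
      (dedupStepA (v2k, dd, km) (key, value)).2.1
      (dedupStepA (v2k, dd, km) (key, value)).2.2
      (dedupStepB (go, groups, t) (key, value)).1
      (dedupStepB (go, groups, t) (key, value)).2.1
      (dedupStepB (go, groups, t) (key, value)).2.2 := by
  obtain ⟨hv2k, hdd, hkm, hgo, ht, hev_lt, hev_nd, hrep_mem, hrep_nd, hval_nd, hseen⟩ := inv
  have hgoD : go = PySem.Dict.mk ((groups.map (fun e => e.2.1)).zipIdx) := PySem.Dict.ext hgo
  have hv2kD : v2k = PySem.Dict.mk (groups.map (fun e => (e.2.1, e.1))) := PySem.Dict.ext hv2k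
  have hfst : (groups.map (fun e => (e.2.1, e.1))).map Prod.fst
      = groups.map (fun e => e.2.1) := by rw [List.map_map]; rfl
  have hkeyrep : key ∉ groups.map (fun e => e.1) := by
    intro h
    obtain ⟨e, he, he1⟩ := List.mem_map.1 h
    exact hfresh (he1 ▸ hrep_mem e he)
  have hddfst : dd.items.map Prod.fst
      = (PySem.List.sorted groups (fun e => e.2.2)).map (fun e => e.1) := by
    rw [hdd, List.map_map]; rfl
  have hkmfst : km.items.map Prod.fst = processed.map Prod.fst := by
    rw [hkm, List.map_map]; rfl
  have hddcont : dd.contains key = false := by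
    apply contains_false_of_not_mem_fst
    rw [hddfst]
    intro h
    obtain ⟨e, he, he1⟩ := List.mem_map.1 h
    exact hkeyrep (List.mem_map.2 ⟨e, (PySem.List.mem_sorted _ _ _ _).1 he, he1⟩)
  have hkmcont : km.contains key = false := by
    apply contains_false_of_not_mem_fst; rw [hkmfst]; exact hfresh
  by_cases hmem : value ∈ groups.map (fun e => e.2.1)
  · -- value already seen: its group is g
    obtain ⟨g, hg, hgv⟩ := List.mem_iff_getElem.1 hmem
    have hglen : g < groups.length := by simpa using hg
    have hval : groups[g].2.1 = value := by simpa using hgv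
    have hB : go.get? value = some g := by
      rw [hgoD, ← hval]
      have h1 := zip_get?_idx (groups.map (fun e => e.2.1)) hval_nd hg
      simpa using h1
    have hA : v2k.get? value = some groups[g].1 := by
      rw [hv2kD]
      have hnd2 : ((groups.map (fun e => (e.2.1, e.1))).map Prod.fst).Nodup := by
        rw [hfst]; exact hval_nd
      have h2 : g < (groups.map (fun e => (e.2.1, e.1))).length := by simpa using hglen
      have h1 := get?_mk_of_nodup _ hnd2 h2
      simpa [hval] using h1
    have hgetDval : go.getD value 0 = g := by
      rw [PySem.Dict.getD_eq_get?_getD, hB]; rfl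
    have heq : groups.getD g ("", "", 0) = groups[g] := List.getD_eq_getElem _ _ hglen
    have hkeyck : key ≠ groups[g].1 := by
      intro he
      exact hkeyrep (he ▸ List.mem_map_of_mem (List.getElem_mem hglen))
    by_cases hcond : (PySem.Str.startswith key "ref_"
        && !PySem.Str.startswith groups[g].1 "ref_") = true
    · -- swap branch
      simp only [dedupStepA, dedupStepB, hA, hB, heq, hcond, if_pos]
      have hvalset : (groups.set g (key, groups[g].2.1, t)).map (fun e => e.2.1)
          = groups.map (fun e => e.2.1) := by
        rw [List.map_set]
        have h0 : g < (groups.map (fun e => e.2.1)).length := by simpa using hglen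
        have h1 : (groups.map (fun e => e.2.1))[g] = groups[g].2.1 := by simp
        rw [← h1]
        exact List.set_getElem_self h0
      have hv2kcont : v2k.contains value = true := by
        rw [PySem.Dict.contains_eq_isSome_get?, hA]; rfl
      -- sorted of the updated groups list
      have hfilter : groups.filter (fun e => !(e.1 == groups[g].1))
          = groups.take g ++ groups.drop (g + 1) :=
        filter_ne_rep groups g hglen hrep_nd _ rfl
      have hsorted' : PySem.List.sorted (groups.set g (key, groups[g].2.1, t))
            (fun e => e.2.2)
          = (PySem.List.sorted groups (fun e => e.2.2)).filter
              (fun e => !(e.1 == groups[g].1)) ++ [(key, groups[g].2.1, t)] := by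
        apply PySem.List.sorted_eq_of_perm_of_pairwise_lt
        · -- permutation
          have hp1 : ((PySem.List.sorted groups (fun e => e.2.2)).filter
                (fun e => !(e.1 == groups[g].1))).Perm
              (groups.filter (fun e => !(e.1 == groups[g].1))) :=
            (PySem.List.sorted_perm groups (fun e => e.2.2) false).filter _
          have hp2 := hp1.append_right [(key, groups[g].2.1, t)]
          rw [hfilter] at hp2
          refine hp2.trans ?_
          rw [List.append_assoc,
            List.set_eq_take_append_cons_drop, if_pos hglen]
          exact List.Perm.append_left _ (List.perm_append_singleton _ _)
        · -- pairwise strictly increasing events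
          have hSle := PySem.List.sorted_pairwise groups (fun e => e.2.2)
          have hSevnd : ((PySem.List.sorted groups (fun e => e.2.2)).map
              (fun e => e.2.2)).Nodup :=
            ((PySem.List.sorted_perm groups (fun e => e.2.2) false).map _).nodup_iff.2 hev_nd
          have hSne : (PySem.List.sorted groups (fun e => e.2.2)).Pairwise
              (fun a b => a.2.2 ≠ b.2.2) := List.pairwise_map.1 hSevnd
          have hSlt : (PySem.List.sorted groups (fun e => e.2.2)).Pairwise
              (fun a b => a.2.2 < b.2.2) :=
            (hSle.and hSne).imp (fun h => lt_of_le_of_ne h.1 h.2)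
          rw [List.pairwise_append]
          refine ⟨hSlt.filter _, List.pairwise_singleton _ _, ?_⟩
          intro a ha b hb
          simp only [List.mem_singleton] at hb
          subst hb
          have : a ∈ groups := (PySem.List.mem_sorted _ _ _ _).1 (List.mem_of_mem_filter ha)
          exact hev_lt a this
      refine ⟨?_, ?_, ?_, ?_, ?_, ?_, ?_, ?_, ?_, ?_, ?_⟩
      · -- v2k
        rw [PySem.Dict.items_insert_of_contains _ _ hv2kcont, hv2k, List.map_map]
        apply List.ext_getElem (by simp)
        intro i h1 h2
        simp only [List.getElem_map, Function.comp_apply]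
        by_cases hig : i = g
        · subst hig
          rw [List.getElem_set_self]
          simp [hval]
        · have hilen : i < groups.length := by simpa using h1
          rw [List.getElem_set_ne (fun h => hig h.symm)]
          have : groups[i].2.1 ≠ value := by
            intro h1
            apply hig
            have h2 := hval_nd.getElem_inj_iff (i := i) (j := g)
              (hi := by simpa using hilen) (hj := by simpa using hglen)
            apply h2.1
            simp only [List.getElem_map]
            rw [h1, hval]
          simp [this]
      · -- dd
        show ((dd.insert key value).erase groups[g].1).items = _
        have h1 : ((dd.insert key value).erase groups[g].1).items
            = (dd.insert key value).items.filter (fun p => !(p.1 == groups[g].1)) := rfl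
        rw [h1, PySem.Dict.items_insert_of_not_contains _ _ hddcont, hdd,
          List.filter_append, List.filter_map, hsorted', List.map_append]
        congr 1
        simp [hkeyck, hval]
      · -- km
        have hlnd : (km.items.map Prod.fst).Nodup := by rw [hkmfst]; exact hknd
        have hkmkeysnd : km.keys.Nodup := hlnd
        have hpatch := patch_fold_items groups[g].1 key km.items km hkmkeysnd hlnd
          (fun p hp => hp)
        have hpatchfst : ((km.items.foldl (fun (a : PySem.Dict String String) p =>
            if p.2 == groups[g].1 then a.insert p.1 key else a) km).items.map Prod.fst)
            = km.items.map Prod.fst := by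
          rw [hpatch, List.map_map]
          apply List.map_congr_left
          intro q hq
          by_cases h : (decide (q.1 ∈ km.items.map Prod.fst) && (q.2 == groups[g].1)) = true
          · simp [h]
          · simp [h]
        have hkm1cont : (km.items.foldl (fun (a : PySem.Dict String String) p =>
            if p.2 == groups[g].1 then a.insert p.1 key else a) km).contains key = false := by
          apply contains_false_of_not_mem_fst
          rw [hpatchfst, hkmfst]
          exact hfresh
        rw [PySem.Dict.items_insert_of_not_contains _ _ hkm1cont, hpatch]
        have hstage1 : km.items.map (fun q =>
              if (decide (q.1 ∈ km.items.map Prod.fst) && (q.2 == groups[g].1)) = true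
              then (q.1, key) else q)
            = km.items.map (fun q => if (q.2 == groups[g].1) = true then (q.1, key) else q) := by
          apply List.map_congr_left
          intro q hq
          have h2 : decide (q.1 ∈ km.items.map Prod.fst) = true :=
            decide_eq_true (List.mem_map_of_mem hq)
          rw [h2, Bool.true_and]
        rw [hstage1, hkm, List.map_append, List.map_map]
        congr 1
        · apply List.map_congr_left
          intro kv hkv
          have hv := hseen kv hkv
          obtain ⟨j, hj, hvj⟩ := List.mem_iff_getElem.1 hv
          have hjlen : j < groups.length := by simpa using hj
          have hvalj : groups[j].2.1 = kv.2 := by simpa using hvj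
          have hgetD : go.getD kv.2 0 = j := by
            rw [PySem.Dict.getD_eq_get?_getD, hgoD, ← hvalj]
            have h1 := zip_get?_idx (groups.map (fun e => e.2.1)) hval_nd hj
            simp only [List.getElem_map] at h1
            rw [h1]; rfl
          simp only [Function.comp_apply, dedupRepOf, hgetD,
            List.getD_eq_getElem _ _ hjlen,
            List.getD_eq_getElem _ _ (by simpa using hjlen :
              j < (groups.set g (key, groups[g].2.1, t)).length)]
          by_cases hjg : j = g
          · subst hjg
            rw [List.getElem_set_self]
            simp
          · rw [List.getElem_set_ne (fun h => hjg h.symm)]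
            have hne : groups[j].1 ≠ groups[g].1 := by
              intro h1
              apply hjg
              have h2 := hrep_nd.getElem_inj_iff (i := j) (j := g)
                (hi := by simpa using hjlen) (hj := by simpa using hglen)
              apply h2.1
              simpa only [List.getElem_map] using h1
            simp [hne]
        · simp only [List.map_cons, List.map_nil, dedupRepOf, hgetDval]
          rw [List.getD_eq_getElem _ _ (by simpa using hglen :
            g < (groups.set g (key, groups[g].2.1, t)).length)]
          rw [List.getElem_set_self]
      · -- go
        rw [hgo, hvalset]
      · simp [ht]
      · intro e he
        rcases List.mem_or_eq_of_mem_set he with h | h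
        · exact Nat.lt_succ_of_lt (hev_lt e h)
        · simp [h]
      · have : (groups.set g (key, groups[g].2.1, t)).map (fun e => e.2.2)
            = (groups.map (fun e => e.2.2)).set g t := by rw [List.map_set]
        rw [this]
        apply nodup_set_of_not_mem _ _ _ hev_nd
        intro h
        obtain ⟨e, he, hee⟩ := List.mem_map.1 h
        have := hev_lt e he
        omega
      · intro e he
        rcases List.mem_or_eq_of_mem_set he with h | h
        · rw [List.map_append]; exact List.mem_append_left _ (hrep_mem e h)
        · rw [h]; simp
      · have : (groups.set g (key, groups[g].2.1, t)).map (fun e => e.1)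
            = (groups.map (fun e => e.1)).set g key := by rw [List.map_set]
        rw [this]
        exact nodup_set_of_not_mem _ _ _ hrep_nd hkeyrep
      · rw [hvalset]; exact hval_nd
      · intro kv hkv
        rw [hvalset]
        rcases List.mem_append.1 hkv with h | h
        · exact hseen kv h
        · simp at h; simp [h, hmem]
    · -- no-swap branch
      rw [Bool.not_eq_true] at hcond
      simp only [dedupStepA, dedupStepB, hA, hB, heq, hcond, Bool.false_eq_true, if_false]
      refine ⟨hv2k, hdd, ?_, hgo, by simp [ht], fun e he => Nat.lt_succ_of_lt (hev_lt e he),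
        hev_nd, ?_, hrep_nd, hval_nd, ?_⟩
      · rw [PySem.Dict.items_insert_of_not_contains _ _ hkmcont, hkm, List.map_append]
        congr 1
        simp only [List.map_cons, List.map_nil, dedupRepOf, hgetDval, heq]
      · intro e he
        rw [List.map_append]
        exact List.mem_append_left _ (hrep_mem e he)
      · intro kv hkv
        rcases List.mem_append.1 hkv with h | h
        · exact hseen kv h
        · simp at h; simp [h, hmem]
  · -- fresh value
    have hA : v2k.get? value = none := by
      rw [hv2kD]; exact get?_mk_of_not_mem _ (by rw [hfst]; exact hmem)
    have hB : go.get? value = none := by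
      rw [hgoD]; exact zip_get?_none _ hmem
    have hv2kcont : v2k.contains value = false := by
      rw [PySem.Dict.contains_eq_isSome_get?, hA]; rfl
    have hgocont : go.contains value = false := by
      rw [PySem.Dict.contains_eq_isSome_get?, hB]; rfl
    simp only [dedupStepA, dedupStepB, hA, hB]
    refine ⟨?_, ?_, ?_, ?_, ?_, ?_, ?_, ?_, ?_, ?_, ?_⟩
    · rw [PySem.Dict.items_insert_of_not_contains _ _ hv2kcont, hv2k, List.map_append]; rfl
    · rw [PySem.Dict.items_insert_of_not_contains _ _ hddcont, hdd,
        sorted_append_max _ _ _ (fun y hy => hev_lt y hy), List.map_append]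
      rfl
    · rw [PySem.Dict.items_insert_of_not_contains _ _ hkmcont, hkm, List.map_append]
      congr 1
      · apply List.map_congr_left
        intro kv hkv
        have hne : kv.2 ≠ value := fun h => hmem (h ▸ hseen kv hkv)
        simp only [dedupRepOf]
        rw [PySem.Dict.getD_insert_of_ne _ _ _ hne]
        have hv := hseen kv hkv
        obtain ⟨j, hj, hvj⟩ := List.mem_iff_getElem.1 hv
        have hjlen : j < groups.length := by simpa using hj
        have hgetD : go.getD kv.2 0 = j := by
          rw [PySem.Dict.getD_eq_get?_getD, hgoD, ← hvj, zip_get?_idx _ hval_nd hj]; rfl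
        rw [hgetD]
        rw [List.getD_eq_getElem _ _ hjlen,
          List.getD_eq_getElem _ _ (by simpa using Nat.lt_succ_of_lt hjlen)]
        rw [List.getElem_append_left hjlen]
      · simp only [List.map_cons, List.map_nil, dedupRepOf]
        rw [PySem.Dict.getD_insert_self]
        rw [List.getD_eq_getElem _ _ (by simp)]
        simp
    · rw [PySem.Dict.items_insert_of_not_contains _ _ hgocont, hgo, List.map_append,
        List.zipIdx_append]
      simp
    · simp [ht]
    · intro e he
      rcases List.mem_append.1 he with h | h
      · exact Nat.lt_succ_of_lt (hev_lt e h)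
      · simp at h; simp [h]
    · rw [List.map_append, List.nodup_append]
      refine ⟨hev_nd, by simp, ?_⟩
      intro a ha b hb
      simp at hb
      subst hb
      obtain ⟨e, he, hee⟩ := List.mem_map.1 ha
      have h1 := hev_lt e he
      omega
    · intro e he
      rcases List.mem_append.1 he with h | h
      · rw [List.map_append]; exact List.mem_append_left _ (hrep_mem e h)
      · simp at h; simp [h]
    · rw [List.map_append, List.nodup_append]
      refine ⟨hrep_nd, by simp, ?_⟩
      intro a ha b hb
      simp at hb
      subst hb
      exact fun he => hkeyrep (he ▸ ha)
    · rw [List.map_append, List.nodup_append]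
      refine ⟨hval_nd, by simp, ?_⟩
      intro a ha b hb
      simp at hb
      subst hb
      exact fun he => hmem (he ▸ ha)
    · intro kv hkv
      rcases List.mem_append.1 hkv with h | h
      · rw [List.map_append]; exact List.mem_append_left _ (hseen kv h)
      · simp at h; simp [h]

lemma dedup_inv_fold (l : List (String × String)) :
    ∀ (processed : List (String × String))
      (v2k dd km : PySem.Dict String String)
      (go : PySem.Dict String Nat) (groups : List (String × String × Nat)) (t : Nat),
      DedupInv processed v2k dd km go groups t →
      ((processed ++ l).map Prod.fst).Nodup →
      DedupInv (processed ++ l)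
        (l.foldl dedupStepA (v2k, dd, km)).1
        (l.foldl dedupStepA (v2k, dd, km)).2.1
        (l.foldl dedupStepA (v2k, dd, km)).2.2
        (l.foldl dedupStepB (go, groups, t)).1
        (l.foldl dedupStepB (go, groups, t)).2.1
        (l.foldl dedupStepB (go, groups, t)).2.2 := by
  induction l with
  | nil => intro processed v2k dd km go groups t inv _; simpa using inv
  | cons kv l ih =>
    intro processed v2k dd km go groups t inv hnd
    have hnd' := hnd
    rw [List.map_append] at hnd'
    have hknd : (processed.map Prod.fst).Nodup := (List.nodup_append.1 hnd').1
    have hfresh : kv.1 ∉ processed.map Prod.fst := by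
      intro h
      exact (List.nodup_append.1 hnd').2.2 _ h _ (by simp) rfl
    have hstep := dedup_inv_step processed v2k dd km go groups t inv kv.1 kv.2 hfresh hknd
    rw [List.foldl_cons, List.foldl_cons]
    have h2 := ih (processed ++ [(kv.1, kv.2)])
      (dedupStepA (v2k, dd, km) (kv.1, kv.2)).1
      (dedupStepA (v2k, dd, km) (kv.1, kv.2)).2.1
      (dedupStepA (v2k, dd, km) (kv.1, kv.2)).2.2
      (dedupStepB (go, groups, t) (kv.1, kv.2)).1
      (dedupStepB (go, groups, t) (kv.1, kv.2)).2.1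
      (dedupStepB (go, groups, t) (kv.1, kv.2)).2.2
      hstep (by simpa [List.append_assoc] using hnd)
    simpa [List.append_assoc] using h2

lemma dedup_inv_nil :
    DedupInv [] PySem.Dict.empty PySem.Dict.empty PySem.Dict.empty PySem.Dict.empty [] 0 :=
  ⟨rfl, rfl, rfl, rfl, rfl, by simp, by simp, by simp, by simp, by simp, by simp⟩

-- ===== VERDICT (by name: the statement is the Claim_ definition above) =====
theorem deduplicate_haps_spec : Claim_equal_deduplicate_haps := by
  intro d _hdom hpre
  show deduplicate_haps d = deduplicate_haps_alt d
  have hinv := dedup_inv_fold d [] PySem.Dict.empty PySem.Dict.empty PySem.Dict.empty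
    PySem.Dict.empty [] 0 dedup_inv_nil (by simpa using hpre)
  rw [List.nil_append] at hinv
  obtain ⟨hv2k, hdd, hkm, hgo, ht, hev_lt, hev_nd, hrep_mem, hrep_nd, hval_nd, hseen⟩ := hinv
  simp only [deduplicate_haps, deduplicate_haps_alt]
  have hgroupsnd : (d.foldl dedupStepB (PySem.Dict.empty, [], 0)).2.1.Nodup :=
    (List.Nodup.of_map _ hrep_nd)
  have hsortrepnd : ((PySem.List.sorted (d.foldl dedupStepB (PySem.Dict.empty, [], 0)).2.1
      (fun e => e.2.2)).map (fun e => e.1)).Nodup :=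
    ((PySem.List.sorted_perm _ _ false).map _).nodup_iff.2 hrep_nd
  have h1 := PySem.Dict.items_foldl_insert_fresh
    (PySem.List.sorted (d.foldl dedupStepB (PySem.Dict.empty, [], 0)).2.1 (fun e => e.2.2))
    (fun e => e.1) (fun e => e.2.1) PySem.Dict.empty
    (fun a _ => rfl) hsortrepnd
  have h2 := PySem.Dict.items_foldl_insert_fresh d
    (fun kv => kv.1)
    (fun kv => dedupRepOf (d.foldl dedupStepB (PySem.Dict.empty, [], 0)).1
      (d.foldl dedupStepB (PySem.Dict.empty, [], 0)).2.1 kv.2) PySem.Dict.empty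
    (fun a _ => rfl) (by simpa using hpre)
  rw [h1, h2]
  exact Prod.ext hdd hkm
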